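-- pv_equiv track=rewrite | github.com/reo91004/Algorithm | [BOJ] 백준 풀이/단계별로 풀어보기 (step by step)/#9 재귀/2447_별 찍기 (22.04.10 성공).py | solution
-- ===== SOURCE A (Python) =====
-- def solution(arr):
--     tmparr = []
--     length = len(arr) # N 크기
--
--     # 새로이 그려야 하는데, 행과 열이 3개씩 더 있으므로 3을 곱한 만큼 반복
--     for i in range(3 * length):
--         if i // length == 1: # 중앙에 공백을 채우기 위한 장치 (N = 9일 때 3, 4, 5 공백)
--             tmparr.append(arr[i % length] + " " * length + arr[i % length])
--         else: # 이외에는 그냥 출력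
--             tmparr.append(arr[i % length] * 3)
--
--     return tmparr
-- ===== SOURCE B (Python) =====
-- def solution(arr):
--     length = len(arr)
--     top = [row * 3 for row in arr]
--     mid = [row + " " * length + row for row in arr]
--     return top + mid + top
-- ===== Notes on version B (the rewrite author's own statement) =====
-- stated objective: simpler
-- what changed: Builds the three row-blocks directly (top, middle, top, with top reused) by comprehensions over arr and concatenates them, eliminating the single 3n-step index loop with i//length branching and i%length modular indexing.
import Mathlib
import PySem

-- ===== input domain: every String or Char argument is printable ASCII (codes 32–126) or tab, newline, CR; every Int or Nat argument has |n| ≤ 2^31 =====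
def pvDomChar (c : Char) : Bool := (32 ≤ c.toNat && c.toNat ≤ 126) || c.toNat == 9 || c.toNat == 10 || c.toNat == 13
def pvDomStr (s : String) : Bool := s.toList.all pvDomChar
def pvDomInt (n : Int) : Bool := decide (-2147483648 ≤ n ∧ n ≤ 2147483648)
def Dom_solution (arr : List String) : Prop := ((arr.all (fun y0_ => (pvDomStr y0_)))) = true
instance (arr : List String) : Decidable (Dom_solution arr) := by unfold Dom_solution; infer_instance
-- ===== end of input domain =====

-- B builds the three row-blocks (top, middle, top — the top block reused) by maps over arr and
-- concatenates them, replacing A's single 3n-step index loop with i//length branching; objective: simpler.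

-- Python 's * n' (string repetition), shared primitive used by both ports
def pyStrMul (s : String) (n : Int) : String := String.ofList (PySem.List.pyRepeat s.toList n)

-- ===== PORT A =====
def solution (arr : List String) : List String :=
  let length : Int := arr.length
  (PySem.List.pyRange 0 (3 * length) 1).foldl
    (fun tmparr i =>
      if PySem.Int.floordiv i length == 1 then
        tmparr ++ [PySem.List.pyGetD arr (PySem.Int.mod i length) "" ++
                   pyStrMul " " length ++
                   PySem.List.pyGetD arr (PySem.Int.mod i length) ""]
      else
        tmparr ++ [pyStrMul (PySem.List.pyGetD arr (PySem.Int.mod i length) "") 3]) []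

-- ===== PORT B =====
def solution_alt (arr : List String) : List String :=
  let length : Int := arr.length
  let top := arr.map (fun row => pyStrMul row 3)
  let mid := arr.map (fun row => row ++ pyStrMul " " length ++ row)
  top ++ mid ++ top

-- ===== PRECONDITION & SPEC =====
def Spec_solution (arr : List String) (out : List String) : Prop := out = solution_alt arr
instance (arr : List String) (out : List String) : Decidable (Spec_solution arr out) := by unfold Spec_solution; infer_instance

-- ===== CLAIM (what is proved, stated in full; the proofs are below) =====
def Claim_equal_solution : Prop := ∀ (arr : List String), Dom_solution arr → Spec_solution arr (solution arr)

-- ===== LEMMAS AND PROOFS =====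
theorem map_range_getD {α β : Type} (l : List α) (d : α) (g : α → β) :
    (List.range l.length).map (fun k => g (l.getD k d)) = l.map g := by
  apply List.ext_getElem
  · simp
  · intro i h1 h2
    simp at h1 ⊢
    simp [List.getElem?_eq_getElem (by simpa using h1)]

theorem seg_eq (arr : List String) (c a b : Int) (g : String → String)
    (ha : a = c * (arr.length : Int)) (hb : b = (c + 1) * (arr.length : Int))
    (hc : ∀ (k : Nat), k < arr.length →
      (if PySem.Int.floordiv (c * (arr.length : Int) + k) (arr.length : Int) == 1 then
        PySem.List.pyGetD arr (PySem.Int.mod (c * (arr.length : Int) + k) (arr.length : Int)) "" ++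
          pyStrMul " " (arr.length : Int) ++
          PySem.List.pyGetD arr (PySem.Int.mod (c * (arr.length : Int) + k) (arr.length : Int)) ""
      else
        pyStrMul (PySem.List.pyGetD arr (PySem.Int.mod (c * (arr.length : Int) + k) (arr.length : Int)) "") 3)
      = g (arr.getD k "")) :
    (PySem.List.pyRange a b 1).map
      (fun i => if PySem.Int.floordiv i (arr.length : Int) == 1 then
        PySem.List.pyGetD arr (PySem.Int.mod i (arr.length : Int)) "" ++
          pyStrMul " " (arr.length : Int) ++
          PySem.List.pyGetD arr (PySem.Int.mod i (arr.length : Int)) ""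
      else
        pyStrMul (PySem.List.pyGetD arr (PySem.Int.mod i (arr.length : Int)) "") 3)
      = arr.map g := by
  subst ha hb
  rw [PySem.List.pyRange_one]
  have harg : ((c + 1) * (arr.length : Int) - c * (arr.length : Int)).toNat = arr.length := by
    have h : (c + 1) * (arr.length : Int) - c * (arr.length : Int) = (arr.length : Int) := by ring
    simp [h]
  rw [harg, List.map_map, ← map_range_getD arr "" g]
  apply List.map_congr_left
  intro k hk
  simp only [List.mem_range] at hk
  simpa using hc k hk

theorem fold_to_map {α β : Type} (l : List α) (c : α → Bool) (f g : α → β) (acc : List β) :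
    l.foldl (fun t i => if c i then t ++ [f i] else t ++ [g i]) acc
      = acc ++ l.map (fun i => if c i then f i else g i) := by
  have he : (fun (t : List β) i => if c i then t ++ [f i] else t ++ [g i])
      = fun t i => t ++ [if c i then f i else g i] := by
    funext t i; by_cases h : c i <;> simp [h]
  rw [he, PySem.List.foldl_append_singleton_eq_map]

theorem solution_eq_alt (arr : List String) : solution arr = solution_alt arr := by
  unfold solution solution_alt
  rw [fold_to_map, List.nil_append]
  have h03 : (0 : Int) ≤ (arr.length : Int) := by positivity
  rw [PySem.List.pyRange_one_append 0 (arr.length : Int) (3 * arr.length) (by omega) (by omega)]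
  rw [PySem.List.pyRange_one_append (arr.length : Int) (2 * arr.length) (3 * arr.length) (by omega) (by omega)]
  rw [List.map_append, List.map_append]
  rw [seg_eq arr 0 0 (arr.length : Int) (fun row => pyStrMul row 3) (by ring) (by ring) ?h0,
      seg_eq arr 1 (arr.length : Int) (2 * (arr.length : Int))
        (fun row => row ++ pyStrMul " " (arr.length : Int) ++ row) (by ring) (by ring) ?h1,
      seg_eq arr 2 (2 * (arr.length : Int)) (3 * (arr.length : Int)) (fun row => pyStrMul row 3)
        (by ring) (by ring) ?h2]
  · simp [List.append_assoc]
  case h0 =>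
    intro k hk
    have hL : 0 < (arr.length : Int) := by exact_mod_cast Nat.pos_of_ne_zero (by omega)
    have e : (0:Int) * (arr.length : Int) + (k:Int) = (k:Int) := by ring
    rw [e]
    have hd : PySem.Int.floordiv ((k:Int)) (arr.length : Int) = 0 := by
      rw [PySem.Int.floordiv_eq_iff_of_pos hL]; constructor <;> omega
    have hm : PySem.Int.mod ((k:Int)) (arr.length : Int) = (k:Int) := by
      have h := PySem.Int.floordiv_mul_add_mod ((k:Int)) (arr.length : Int)
      rw [hd] at h; omega
    rw [hd, hm, PySem.List.pyGetD_natCast]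
    norm_num
  case h1 =>
    intro k hk
    have hL : 0 < (arr.length : Int) := by exact_mod_cast Nat.pos_of_ne_zero (by omega)
    have e : (1:Int) * (arr.length : Int) + (k:Int) = ((arr.length : Int) + (k:Int)) := by ring
    rw [e]
    have hd : PySem.Int.floordiv (((arr.length : Int) + (k:Int))) (arr.length : Int) = 1 := by
      rw [PySem.Int.floordiv_eq_iff_of_pos hL]; constructor <;> omega
    have hm : PySem.Int.mod (((arr.length : Int) + (k:Int))) (arr.length : Int) = (k:Int) := by
      have h := PySem.Int.floordiv_mul_add_mod (((arr.length : Int) + (k:Int))) (arr.length : Int)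
      rw [hd] at h; omega
    rw [hd, hm, PySem.List.pyGetD_natCast]
    norm_num
  case h2 =>
    intro k hk
    have hL : 0 < (arr.length : Int) := by exact_mod_cast Nat.pos_of_ne_zero (by omega)
    have e : (2:Int) * (arr.length : Int) + (k:Int) = (2 * (arr.length : Int) + (k:Int)) := by ring
    rw [e]
    have hd : PySem.Int.floordiv ((2 * (arr.length : Int) + (k:Int))) (arr.length : Int) = 2 := by
      rw [PySem.Int.floordiv_eq_iff_of_pos hL]; constructor <;> omega
    have hm : PySem.Int.mod ((2 * (arr.length : Int) + (k:Int))) (arr.length : Int) = (k:Int) := by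
      have h := PySem.Int.floordiv_mul_add_mod ((2 * (arr.length : Int) + (k:Int))) (arr.length : Int)
      rw [hd] at h; omega
    rw [hd, hm, PySem.List.pyGetD_natCast]
    norm_num

-- ===== VERDICT (by name: the statement is the Claim_ definition above) =====
theorem solution_spec : Claim_equal_solution := by
  intro arr _
  exact solution_eq_alt arr
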